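-- pv_equiv track=rewrite | github.com/NatalieAnselmi/Treponema_mapping | data_sort.py | map_health_status
-- ===== SOURCE A (Python) =====
-- def map_health_status(status):
--     if isinstance(status, str):
--         if status.startswith("X"):
--             return "Y"
--
--         mappings = {
--             "Healthy": "Healthy",
--             "Diseased, Stable": "Stable PD",
--             "Diseased; Stable": "Stable PD",
--             "Diseased, Progressing": "Progressing PD",
--             "Diseased; Progressing": "Progressing PD",
--             "Diseased; Fluctuant": "Fluctuating PD",
--             "Diseased; Fluctuating": "Fluctuating PD",
--             "Diseased": "PD"
--         }
--
--         status = status.strip()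
--         for key in sorted(mappings.keys(), key=len, reverse=True):
--             if status.startswith(key):
--                 return mappings[key]
--         return status
--     return status
-- ===== SOURCE B (Python) =====
-- def map_health_status(status):
--     # Compiled decision tree over the fixed key set: branch on "Healthy"/"Diseased",
--     # then on the exact separator+tail after "Diseased" -- no dict, no sort, no key scan.
--     if not isinstance(status, str):
--         return status
--     if status.startswith("X"):
--         return "Y"
--     s = status.strip()
--     if s.startswith("Healthy"):
--         return "Healthy"
--     if not s.startswith("Diseased"):
--         return s
--     rest = s[8:]
--     if rest.startswith(", Stable") or rest.startswith("; Stable"):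
--         return "Stable PD"
--     if rest.startswith(", Progressing") or rest.startswith("; Progressing"):
--         return "Progressing PD"
--     if rest.startswith("; Fluctuant") or rest.startswith("; Fluctuating"):
--         return "Fluctuating PD"
--     return "PD"
-- ===== Notes on version B (the rewrite author's own statement) =====
-- stated objective: alternative
-- what changed: Replaces A's dict plus sort-keys-by-length-then-scan-for-first-prefix with a hard-coded decision tree: branch on the two possible head words, slice off the 8-char disease prefix, and test the exact separator+tail suffixes directly; no dict, no sort, no key loop.
import Mathlib
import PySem

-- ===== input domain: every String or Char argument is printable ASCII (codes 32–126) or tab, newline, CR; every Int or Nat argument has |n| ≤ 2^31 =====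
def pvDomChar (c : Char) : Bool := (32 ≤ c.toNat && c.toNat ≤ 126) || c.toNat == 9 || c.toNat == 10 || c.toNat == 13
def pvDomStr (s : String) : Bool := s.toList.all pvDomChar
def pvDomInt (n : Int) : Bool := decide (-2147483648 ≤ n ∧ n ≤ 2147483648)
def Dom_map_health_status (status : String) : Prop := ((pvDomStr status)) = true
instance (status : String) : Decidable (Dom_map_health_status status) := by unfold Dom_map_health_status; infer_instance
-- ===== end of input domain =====

-- B replaces A's dict + sort-keys-by-length + first-prefix-match scan by a hard-coded
-- decision tree (branch on "Healthy"/"Diseased", then on the exact separator+tail): alternative decomposition.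

-- ===== PORT A =====
-- the literal mappings dict A defines
def pvMappings : PySem.Dict String String := PySem.Dict.ofList
  [("Healthy", "Healthy"),
   ("Diseased, Stable", "Stable PD"),
   ("Diseased; Stable", "Stable PD"),
   ("Diseased, Progressing", "Progressing PD"),
   ("Diseased; Progressing", "Progressing PD"),
   ("Diseased; Fluctuant", "Fluctuating PD"),
   ("Diseased; Fluctuating", "Fluctuating PD"),
   ("Diseased", "PD")]

-- 'for key in …: if status.startswith(key): return mappings[key]' / fall through to 'return status'
def pvLoopA (s : String) : List String → String
  | [] => s
  | k :: rest => if PySem.Str.startswith s k then (PySem.Dict.get? pvMappings k).getD "" else pvLoopA s rest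

def map_health_status (status : String) : String :=
  if PySem.Str.startswith status "X" then "Y"
  else
    let s := PySem.Str.strip status
    pvLoopA s (PySem.List.sorted (PySem.Dict.keys pvMappings) (fun k => PySem.Str.len k) true)

-- ===== PORT B =====
def map_health_status_alt (status : String) : String :=
  if PySem.Str.startswith status "X" then "Y"
  else
    let s := PySem.Str.strip status
    if PySem.Str.startswith s "Healthy" then "Healthy"
    else if !(PySem.Str.startswith s "Diseased") then s
    else
      let rest := PySem.Str.slice s (some (8 : Int)) none
      if PySem.Str.startswith rest ", Stable" || PySem.Str.startswith rest "; Stable" then "Stable PD"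
      else if PySem.Str.startswith rest ", Progressing" || PySem.Str.startswith rest "; Progressing" then "Progressing PD"
      else if PySem.Str.startswith rest "; Fluctuant" || PySem.Str.startswith rest "; Fluctuating" then "Fluctuating PD"
      else "PD"

-- ===== PRECONDITION & SPEC =====
def Spec_map_health_status (status : String) (out : String) : Prop := out = map_health_status_alt status
instance (status : String) (out : String) : Decidable (Spec_map_health_status status out) := by unfold Spec_map_health_status; infer_instance

-- ===== CLAIM (what is proved, stated in full; the proofs are below) =====
def Claim_equal_map_health_status : Prop := ∀ (status : String), Dom_map_health_status status → Spec_map_health_status status (map_health_status status)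

-- ===== LEMMAS AND PROOFS =====
lemma pv_isPrefixOf_append (a : List Char) : ∀ (l : List Char) (b : List Char),
    (a ++ b).isPrefixOf l = (a.isPrefixOf l && b.isPrefixOf (l.drop a.length)) := by
  induction a with
  | nil => intro l b; simp [List.isPrefixOf]
  | cons x a ih =>
    intro l b
    cases l with
    | nil => simp [List.isPrefixOf]
    | cons y l => simp [List.isPrefixOf, ih, Bool.and_assoc]

-- a string cannot start with both "Healthy" and "Diseased"
lemma pv_HD {cs : List Char} (h : ['D','i','s','e','a','s','e','d'] <+: cs) :
    ¬ ['H','e','a','l','t','h','y'] <+: cs := by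
  rintro ⟨t, rfl⟩
  rcases h with ⟨u, hu⟩
  simp at hu

-- incomparable prefixes of the same list cannot both hold
lemma pv_excl {a b d : List Char} (hne : ¬ a <+: b) (hne' : ¬ b <+: a) (ha : a <+: d) :
    ¬ b <+: d := by
  intro hb
  rcases le_total a.length b.length with h | h
  · exact hne (List.prefix_of_prefix_length_le ha hb h)
  · exact hne' (List.prefix_of_prefix_length_le hb ha h)

-- startswith on a key of the form "Diseased" ++ t, seen through the drop-8 tail
lemma pv_sw (s t k : String) (hk : k.toList = "Diseased".toList ++ t.toList) :
    PySem.Str.startswith s k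
      = (PySem.Str.startswith s "Diseased" && t.toList.isPrefixOf (s.toList.drop 8)) := by
  have h1 : PySem.Str.startswith s k = k.toList.isPrefixOf s.toList := rfl
  have h2 : PySem.Str.startswith s "Diseased" = "Diseased".toList.isPrefixOf s.toList := rfl
  have h8 : ("Diseased".toList).length = 8 := rfl
  rw [h1, h2, hk, pv_isPrefixOf_append, h8]

-- startswith on s[8:] is a prefix test on the drop-8 tail
lemma pv_swr (s t : String) :
    PySem.Str.startswith (PySem.Str.slice s (some (8 : Int)) none) t
      = t.toList.isPrefixOf (s.toList.drop 8) := by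
  have h1 : (PySem.Str.slice s (some (8 : Int)) none).toList = s.toList.drop 8 := by
    rw [PySem.Str.toList_slice, PySem.Chars.slice_eq_listSlice, PySem.List.slice_some_none]
    have hc : PySem.List.clampIdx s.toList.length (8 : Int) = min 8 s.toList.length := by
      have := PySem.List.clampIdx_natCast (n := s.toList.length) (k := 8)
      simpa using this
    rw [hc]
    rcases le_total 8 s.toList.length with h | h
    · rw [min_eq_left h]
    · rw [min_eq_right h, List.drop_length, List.drop_eq_nil_of_le h]
  have h2 : PySem.Str.startswith (PySem.Str.slice s (some (8 : Int)) none) t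
      = t.toList.isPrefixOf (PySem.Str.slice s (some (8 : Int)) none).toList := rfl
  rw [h2, h1]

set_option maxHeartbeats 1000000 in
lemma pv_sorted_keys :
    PySem.List.sorted (PySem.Dict.keys pvMappings) (fun k => PySem.Str.len k) true =
    ["Diseased, Progressing", "Diseased; Progressing", "Diseased; Fluctuating",
     "Diseased; Fluctuant", "Diseased, Stable", "Diseased; Stable",
     "Diseased", "Healthy"] := by decide

set_option maxHeartbeats 1000000 in
lemma pv_unfold (s : String) :
    pvLoopA s ["Diseased, Progressing", "Diseased; Progressing", "Diseased; Fluctuating",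
               "Diseased; Fluctuant", "Diseased, Stable", "Diseased; Stable",
               "Diseased", "Healthy"] =
    (if PySem.Str.startswith s "Diseased, Progressing" then "Progressing PD"
     else if PySem.Str.startswith s "Diseased; Progressing" then "Progressing PD"
     else if PySem.Str.startswith s "Diseased; Fluctuating" then "Fluctuating PD"
     else if PySem.Str.startswith s "Diseased; Fluctuant" then "Fluctuating PD"
     else if PySem.Str.startswith s "Diseased, Stable" then "Stable PD"
     else if PySem.Str.startswith s "Diseased; Stable" then "Stable PD"
     else if PySem.Str.startswith s "Diseased" then "PD"
     else if PySem.Str.startswith s "Healthy" then "Healthy"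
     else s) := by
  simp only [pvLoopA,
    show ((PySem.Dict.get? pvMappings "Diseased, Progressing").getD "") = "Progressing PD" from by decide,
    show ((PySem.Dict.get? pvMappings "Diseased; Progressing").getD "") = "Progressing PD" from by decide,
    show ((PySem.Dict.get? pvMappings "Diseased; Fluctuating").getD "") = "Fluctuating PD" from by decide,
    show ((PySem.Dict.get? pvMappings "Diseased; Fluctuant").getD "") = "Fluctuating PD" from by decide,
    show ((PySem.Dict.get? pvMappings "Diseased, Stable").getD "") = "Stable PD" from by decide,
    show ((PySem.Dict.get? pvMappings "Diseased; Stable").getD "") = "Stable PD" from by decide,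
    show ((PySem.Dict.get? pvMappings "Diseased").getD "") = "PD" from by decide,
    show ((PySem.Dict.get? pvMappings "Healthy").getD "") = "Healthy" from by decide]

-- the core: A's key scan equals B's decision tree, on the stripped string
lemma pv_core (s : String) :
    pvLoopA s (PySem.List.sorted (PySem.Dict.keys pvMappings) (fun k => PySem.Str.len k) true) =
    (if PySem.Str.startswith s "Healthy" then "Healthy"
     else if !(PySem.Str.startswith s "Diseased") then s
     else
       let rest := PySem.Str.slice s (some (8 : Int)) none
       if PySem.Str.startswith rest ", Stable" || PySem.Str.startswith rest "; Stable" then "Stable PD"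
       else if PySem.Str.startswith rest ", Progressing" || PySem.Str.startswith rest "; Progressing" then "Progressing PD"
       else if PySem.Str.startswith rest "; Fluctuant" || PySem.Str.startswith rest "; Fluctuating" then "Fluctuating PD"
       else "PD") := by
  rw [pv_sorted_keys, pv_unfold]
  simp only [pv_sw s ", Progressing" "Diseased, Progressing" rfl,
      pv_sw s "; Progressing" "Diseased; Progressing" rfl,
      pv_sw s "; Fluctuating" "Diseased; Fluctuating" rfl,
      pv_sw s "; Fluctuant" "Diseased; Fluctuant" rfl,
      pv_sw s ", Stable" "Diseased, Stable" rfl,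
      pv_sw s "; Stable" "Diseased; Stable" rfl,
      pv_swr]
  set d := s.toList.drop 8 with hd
  by_cases hDis : ['D','i','s','e','a','s','e','d'] <+: s.toList
  · have hHea := pv_HD hDis
    by_cases q5 : [',', ' ', 'S', 't', 'a', 'b', 'l', 'e'] <+: d
    · have e1 := pv_excl (b := [',', ' ', 'P', 'r', 'o', 'g', 'r', 'e', 's', 's', 'i', 'n', 'g']) (by decide) (by decide) q5
      have e2 := pv_excl (b := [';', ' ', 'P', 'r', 'o', 'g', 'r', 'e', 's', 's', 'i', 'n', 'g']) (by decide) (by decide) q5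
      have e3 := pv_excl (b := [';', ' ', 'F', 'l', 'u', 'c', 't', 'u', 'a', 't', 'i', 'n', 'g']) (by decide) (by decide) q5
      have e4 := pv_excl (b := [';', ' ', 'F', 'l', 'u', 'c', 't', 'u', 'a', 'n', 't']) (by decide) (by decide) q5
      simp [PySem.Chars.startswith_iff, Bool.eq_false_iff, hDis, hHea, q5, e1, e2, e3, e4]
    · by_cases q6 : [';', ' ', 'S', 't', 'a', 'b', 'l', 'e'] <+: d
      · have e1 := pv_excl (b := [',', ' ', 'P', 'r', 'o', 'g', 'r', 'e', 's', 's', 'i', 'n', 'g']) (by decide) (by decide) q6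
        have e2 := pv_excl (b := [';', ' ', 'P', 'r', 'o', 'g', 'r', 'e', 's', 's', 'i', 'n', 'g']) (by decide) (by decide) q6
        have e3 := pv_excl (b := [';', ' ', 'F', 'l', 'u', 'c', 't', 'u', 'a', 't', 'i', 'n', 'g']) (by decide) (by decide) q6
        have e4 := pv_excl (b := [';', ' ', 'F', 'l', 'u', 'c', 't', 'u', 'a', 'n', 't']) (by decide) (by decide) q6
        simp [PySem.Chars.startswith_iff, Bool.eq_false_iff, hDis, hHea, q6, q5, e1, e2, e3, e4]
      · by_cases q1 : [',', ' ', 'P', 'r', 'o', 'g', 'r', 'e', 's', 's', 'i', 'n', 'g'] <+: d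
        · simp [PySem.Chars.startswith_iff, Bool.eq_false_iff, hDis, hHea, q1, q5, q6]
        · by_cases q2 : [';', ' ', 'P', 'r', 'o', 'g', 'r', 'e', 's', 's', 'i', 'n', 'g'] <+: d
          · simp [PySem.Chars.startswith_iff, Bool.eq_false_iff, hDis, hHea, q1, q2, q5, q6]
          · by_cases q3 : [';', ' ', 'F', 'l', 'u', 'c', 't', 'u', 'a', 't', 'i', 'n', 'g'] <+: d
            · simp [PySem.Chars.startswith_iff, Bool.eq_false_iff, hDis, hHea, q1, q2, q3, q5, q6]
            · by_cases q4 : [';', ' ', 'F', 'l', 'u', 'c', 't', 'u', 'a', 'n', 't'] <+: d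
              · simp [PySem.Chars.startswith_iff, Bool.eq_false_iff, hDis, hHea, q1, q2, q3, q4, q5, q6]
              · simp [PySem.Chars.startswith_iff, Bool.eq_false_iff, hDis, hHea, q1, q2, q3, q4, q5, q6]
  · simp [PySem.Chars.startswith_iff, Bool.eq_false_iff, hDis]

-- ===== VERDICT (by name: the statement is the Claim_ definition above) =====
theorem map_health_status_spec : Claim_equal_map_health_status := by
  intro status _
  unfold Spec_map_health_status map_health_status map_health_status_alt
  by_cases hx : PySem.Str.startswith status "X" = true
  · rw [if_pos hx, if_pos hx]
  · rw [if_neg hx, if_neg hx]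
    exact pv_core (PySem.Str.strip status)
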